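-- pv_equiv track=rewrite | github.com/rramirez-git/tereapps | app_reports/reporte_models.py | replace_secuence_caracter
-- ===== SOURCE A (Python) =====
-- def replace_secuence_caracter(cadena):
--     """
--     Reemplaza las secuencias de escape escritas en el campo
--
--     Parameters
--     ----------
--     cadena : string
--         cadena en la cual se reemplazaran las secuenciass de escape
--
--     Secuencias a reemplazar
--     -----------------------
--     - \\r => \r
--     - \\n => \n
--     - \\' => \'
--     - \\" => \"
--     - \\t => \t
--     - \\v => \v
--     """
--     replaces = [
--         ["\\r", "\r"],
--         ["\\n", "\n"],
--         ["\\'", "\'"],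
--         ['\\"', '\"'],
--         ["\\t", "\t"],
--         ["\\v", "\v"],
--     ]
--     for seq in replaces:
--         cadena = cadena.replace(seq[0], seq[1])
--     return cadena
-- ===== SOURCE B (Python) =====
-- ESC = {"r": "\r", "n": "\n", "'": "'", '"': '"', "t": "\t", "v": "\v"}
--
--
-- def replace_secuence_caracter(cadena):
--     out = []
--     i = 0
--     n = len(cadena)
--     while i < n:
--         ch = cadena[i]
--         if ch == "\\" and i + 1 < n and cadena[i + 1] in ESC:
--             out.append(ESC[cadena[i + 1]])
--             i += 2
--         else:
--             out.append(ch)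
--             i += 1
--     return "".join(out)
-- ===== Notes on version B (the rewrite author's own statement) =====
-- stated objective: alternative
-- what changed: Replaced six sequential full-string str.replace passes by a single left-to-right scan with a dict mapping escape letters to their characters; trades CPython's C-level replace loops for one pure-Python pass.
import Mathlib
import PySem

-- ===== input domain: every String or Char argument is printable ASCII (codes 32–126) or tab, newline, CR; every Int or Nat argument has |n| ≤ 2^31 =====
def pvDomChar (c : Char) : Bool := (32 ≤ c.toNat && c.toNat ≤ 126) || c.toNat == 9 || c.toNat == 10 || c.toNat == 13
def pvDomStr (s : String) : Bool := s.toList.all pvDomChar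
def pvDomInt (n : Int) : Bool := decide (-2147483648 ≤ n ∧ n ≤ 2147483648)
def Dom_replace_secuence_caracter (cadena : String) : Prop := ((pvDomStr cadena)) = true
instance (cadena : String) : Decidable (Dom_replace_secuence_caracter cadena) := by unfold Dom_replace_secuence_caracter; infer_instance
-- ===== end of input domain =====

-- B replaces A's six sequential full-string replace passes by a single left-to-right scan
-- with a lookup table from escape letters to characters (objective: alternative single-pass algorithm).


-- ===== PORT A =====
-- A's list `replaces` of (pattern, replacement) pairs; the for-loop over it is a foldl of str.replace
def replace_secuence_caracter (cadena : String) : String :=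
  let replaces : List (String × String) :=
    [("\\r", "\r"), ("\\n", "\n"), ("\\'", "'"), ("\\\"", "\""), ("\\t", "\t"), ("\\v", "\x0b")]
  replaces.foldl (fun c seq => PySem.Str.replace c seq.1 seq.2) cadena

-- ===== PORT B =====
-- Source B's module-level dict ESC
def pvESC : PySem.Dict Char Char :=
  PySem.Dict.ofList [('r', '\r'), ('n', '\n'), ('\'', '\''), ('"', '"'), ('t', '\t'), ('v', '\x0b')]

-- Source B's while loop over the index i, as structural recursion over the remaining characters:
-- backslash followed by a table key emits the mapped character and advances 2, else emit and advance 1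
def pvScanB : List Char → List Char
  | [] => []
  | ch :: rest =>
    if ch = '\\' then
      match rest with
      | d :: rest' =>
        match pvESC.get? d with
        | some r => r :: pvScanB rest'
        | none => ch :: pvScanB (d :: rest')
      | [] => [ch]
    else ch :: pvScanB rest

def replace_secuence_caracter_alt (cadena : String) : String :=
  String.ofList (pvScanB cadena.toList)

-- ===== PRECONDITION & SPEC =====
def Spec_replace_secuence_caracter (cadena : String) (out : String) : Prop := out = replace_secuence_caracter_alt cadena
instance (cadena : String) (out : String) : Decidable (Spec_replace_secuence_caracter cadena out) := by unfold Spec_replace_secuence_caracter; infer_instance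

-- ===== CLAIM (what is proved, stated in full; the proofs are below) =====
def Claim_equal_replace_secuence_caracter : Prop := ∀ (cadena : String), Dom_replace_secuence_caracter cadena → Spec_replace_secuence_caracter cadena (replace_secuence_caracter cadena)

-- ===== LEMMAS AND PROOFS =====

-- proof-only generalisation of the one-pass scan: scan with an arbitrary key/value table
def pvScanK (ks : List (Char × Char)) : List Char → List Char
  | [] => []
  | ch :: rest =>
    if ch = '\\' then
      match rest with
      | d :: rest' =>
        match List.lookup d ks with
        | some r => r :: pvScanK ks rest'
        | none => ch :: pvScanK ks (d :: rest')
      | [] => [ch]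
    else ch :: pvScanK ks rest

-- the full table of Source B, as an association list
def pvKS : List (Char × Char) := [('r', '\r'), ('n', '\n'), ('\'', '\''), ('"', '"'), ('t', '\t'), ('v', '\x0b')]

-- str.replace with a two-char pattern "\c" and one-char replacement v is the single-key scan
theorem pvReplace_go_scan (c v : Char) :
    ∀ (fuel : Nat) (l acc : List Char), l.length ≤ fuel →
      PySem.Chars.replace.go ['\\', c] [v] fuel l acc = acc.reverse ++ pvScanK [(c, v)] l := by
  intro fuel
  induction fuel with
  | zero =>
    intro l acc h
    have : l = [] := List.length_eq_zero_iff.mp (Nat.le_zero.mp h)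
    subst this
    simp [PySem.Chars.replace.go, pvScanK]
  | succ n ih =>
    intro l acc h
    match l with
    | [] => simp [PySem.Chars.replace.go, pvScanK]
    | ch :: t =>
      by_cases hpre : List.isPrefixOf ['\\', c] (ch :: t) = true
      · obtain ⟨t₂, ht⟩ : ∃ t₂, ch :: t = '\\' :: c :: t₂ := by
          cases t with
          | nil => simp [List.isPrefixOf] at hpre
          | cons d t' =>
            simp [List.isPrefixOf] at hpre
            exact ⟨t', by simp [hpre.1.symm, hpre.2.symm]⟩
        rw [show PySem.Chars.replace.go ['\\', c] [v] (n+1) (ch :: t) acc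
              = PySem.Chars.replace.go ['\\', c] [v] n (List.drop 2 (ch :: t)) ([v].reverse ++ acc) by
            simp [PySem.Chars.replace.go, hpre]]
        cases ht
        have hlen : t₂.length ≤ n := by simp at h; omega
        simp only [List.drop]
        rw [ih t₂ ([v].reverse ++ acc) hlen]
        simp [pvScanK]
      · rw [show PySem.Chars.replace.go ['\\', c] [v] (n+1) (ch :: t) acc
              = PySem.Chars.replace.go ['\\', c] [v] n t (ch :: acc) by
            simp [PySem.Chars.replace.go, hpre]]
        rw [ih t (ch :: acc) (by simp at h; omega)]
        by_cases hch : ch = '\\'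
        · subst hch
          cases t with
          | nil => simp [pvScanK]
          | cons d t' =>
            have hd : d ≠ c := by
              intro hdc; subst hdc; simp [List.isPrefixOf] at hpre
            have : (d == c) = false := beq_eq_false_iff_ne.mpr hd
            simp [pvScanK, this]
        · conv_rhs => rw [pvScanK.eq_def]
          simp [hch]

theorem pvReplace_eq_scanK (c v : Char) (s : List Char) :
    PySem.Chars.replace s ['\\', c] [v] = pvScanK [(c, v)] s := by
  rw [PySem.Chars.replace]
  simp
  exact (pvReplace_go_scan c v s.length s [] (le_refl _)).trans (by simp)

theorem pvLookup_val_mem {ks : List (Char × Char)} {d r : Char}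
    (h : List.lookup d ks = some r) : r ∈ ks.map Prod.snd := by
  induction ks with
  | nil => simp [List.lookup] at h
  | cons p t ih =>
    rw [List.lookup_cons] at h
    by_cases hd : d == p.1
    · simp [hd] at h; simp [← h]
    · simp [hd] at h; simp [ih h]

theorem pvLookup_append (d : Char) (l₁ l₂ : List (Char × Char)) :
    List.lookup d (l₁ ++ l₂) = (List.lookup d l₁).or (List.lookup d l₂) := by
  induction l₁ with
  | nil => simp [List.lookup]
  | cons p t ih =>
    rw [List.cons_append, List.lookup_cons, List.lookup_cons]
    by_cases hd : d == p.1
    · simp [hd]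
    · simp [hd, ih]

theorem pvScanK_bs_nil (ks : List (Char × Char)) : pvScanK ks ['\\'] = ['\\'] := by
  rw [pvScanK.eq_def]; simp

theorem pvScanK_bs_some (ks : List (Char × Char)) (d w : Char) (t : List Char)
    (hl : List.lookup d ks = some w) :
    pvScanK ks ('\\' :: d :: t) = w :: pvScanK ks t := by
  rw [pvScanK.eq_def]; simp [hl]

theorem pvScanK_bs_none (ks : List (Char × Char)) (d : Char) (t : List Char)
    (hl : List.lookup d ks = none) :
    pvScanK ks ('\\' :: d :: t) = '\\' :: pvScanK ks (d :: t) := by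
  rw [pvScanK.eq_def]; simp [hl]

theorem pvScanK_cons (ks : List (Char × Char)) (ch : Char) (t : List Char)
    (h : ch ≠ '\\') : pvScanK ks (ch :: t) = ch :: pvScanK ks t := by
  rw [pvScanK.eq_def]; simp [h]

-- the head of a scan result is the head of the input or a table value
theorem pvScanK_head_ne (ks : List (Char × Char)) (k : Char)
    (hk : k ≠ '\\') (hv : ∀ w ∈ ks.map Prod.snd, w ≠ k) (s : List Char)
    (hs : s.head? ≠ some k) : (pvScanK ks s).head? ≠ some k := by
  match s with
  | [] => simp [pvScanK]
  | ch :: rest =>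
    rw [pvScanK.eq_def]
    by_cases hch : ch = '\\'
    · subst hch
      match rest with
      | [] => simpa using (Ne.symm hk)
      | d :: rest' =>
        match hl : List.lookup d ks with
        | some r =>
          have hr : r ≠ k := hv r (pvLookup_val_mem hl)
          simp [hl, hr]
        | none => simp [hl]; exact (Ne.symm hk)
    · simp only [if_neg hch]
      simpa using (by simpa using hs)

theorem pvScanK_single_bs (k v : Char) (X : List Char) (hX : X.head? ≠ some k) :
    pvScanK [(k, v)] ('\\' :: X) = '\\' :: pvScanK [(k, v)] X := by
  match X with
  | [] => simp [pvScanK]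
  | e :: X' =>
    have he : e ≠ k := by simpa using hX
    have : (e == k) = false := beq_eq_false_iff_ne.mpr he
    simp [pvScanK, List.lookup, this]

-- composing the one-key scan for k after a multi-key scan = the scan with key k appended
theorem pvScanK_comp (ks : List (Char × Char)) (k v : Char)
    (hk : k ≠ '\\')
    (hvalk : ∀ w ∈ ks.map Prod.snd, w ≠ k)
    (hvalbs : ∀ w ∈ ks.map Prod.snd, w ≠ '\\') :
    ∀ (s : List Char), pvScanK [(k, v)] (pvScanK ks s) = pvScanK (ks ++ [(k, v)]) s := by
  suffices H : ∀ (n : Nat) (s : List Char), s.length ≤ n →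
      pvScanK [(k, v)] (pvScanK ks s) = pvScanK (ks ++ [(k, v)]) s by
    intro s; exact H s.length s le_rfl
  intro n
  induction n with
  | zero =>
    intro s h
    have : s = [] := List.length_eq_zero_iff.mp (Nat.le_zero.mp h)
    subst this; simp [pvScanK]
  | succ n ih =>
    intro s h
    match s with
    | [] => simp [pvScanK]
    | ch :: rest =>
      have hrest : rest.length ≤ n := by simp at h; omega
      by_cases hch : ch = '\\'
      · subst hch
        match rest with
        | [] => rw [pvScanK_bs_nil, pvScanK_bs_nil, pvScanK_bs_nil]
        | d :: rest' =>
          have hrest' : rest'.length ≤ n := by simp at hrest; omega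
          match hl : List.lookup d ks with
          | some w =>
            have hw : w ≠ '\\' := hvalbs w (pvLookup_val_mem hl)
            have hlapp : List.lookup d (ks ++ [(k, v)]) = some w := by
              rw [pvLookup_append, hl]; rfl
            rw [pvScanK_bs_some ks d w rest' hl, pvScanK_cons _ w _ hw,
                pvScanK_bs_some _ d w rest' hlapp, ih rest' hrest']
          | none =>
            by_cases hdk : d = k
            · have hlapp : List.lookup d (ks ++ [(k, v)]) = some v := by
                rw [pvLookup_append, hl, hdk]; simp [List.lookup]
              have hdbs : d ≠ '\\' := by rw [hdk]; exact hk
              have hld : List.lookup d [(k, v)] = some v := by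
                rw [hdk]; simp [List.lookup]
              rw [pvScanK_bs_none ks d rest' hl, pvScanK_cons ks d _ hdbs,
                  pvScanK_bs_some _ d v _ hld, pvScanK_bs_some _ d v rest' hlapp,
                  ih rest' hrest']
            · have hlapp : List.lookup d (ks ++ [(k, v)]) = none := by
                rw [pvLookup_append, hl]
                simp [List.lookup, beq_eq_false_iff_ne.mpr hdk]
              have hhead : (pvScanK ks (d :: rest')).head? ≠ some k := by
                apply pvScanK_head_ne ks k hk hvalk
                simpa using hdk
              rw [pvScanK_bs_none ks d rest' hl, pvScanK_single_bs k v _ hhead,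
                  pvScanK_bs_none _ d rest' hlapp, ih (d :: rest') hrest]
      · rw [pvScanK_cons ks ch rest hch, pvScanK_cons _ ch _ hch,
            pvScanK_cons _ ch rest hch, ih rest hrest]

theorem pvESC_items : pvESC = PySem.Dict.mk pvKS := by decide

theorem pvESC_get_eq (d : Char) : pvESC.get? d = List.lookup d pvKS := by
  rw [pvESC_items]
  simp only [pvKS, PySem.Dict.get?_mk_cons, List.lookup]
  split_ifs with h1 h2 h3 h4 h5 h6 <;>
    try (have h := beq_iff_eq.mp (by assumption); subst h; decide)
  have e1 : (d == 'r') = false := by simpa [BEq.comm] using h1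
  have e2 : (d == 'n') = false := by simpa [BEq.comm] using h2
  have e3 : (d == '\'') = false := by simpa [BEq.comm] using h3
  have e4 : (d == '"') = false := by simpa [BEq.comm] using h4
  have e5 : (d == 't') = false := by simpa [BEq.comm] using h5
  have e6 : (d == 'v') = false := by simpa [BEq.comm] using h6
  simp [e1, e2, e3, e4, e5, e6, PySem.Dict.get?]

theorem pvScanB_eq (s : List Char) : pvScanB s = pvScanK pvKS s := by
  fun_induction pvScanB s with
  | case1 => rfl
  | case2 d rest' r hget ih =>
    rw [pvScanK.eq_def]
    simp only []
    rw [← pvESC_get_eq, hget, ih]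
    simp
  | case3 d rest' hget ih =>
    rw [pvScanK.eq_def]
    simp only []
    rw [← pvESC_get_eq, hget, ih]
    simp
  | case4 => rw [pvScanK.eq_def]; simp
  | case5 ch rest hch ih => rw [pvScanK.eq_def]; simp only [if_neg hch]; rw [ih]

-- ===== VERDICT (by name: the statement is the Claim_ definition above) =====
theorem replace_secuence_caracter_spec : Claim_equal_replace_secuence_caracter := by
  unfold Claim_equal_replace_secuence_caracter
  intro cadena _
  unfold Spec_replace_secuence_caracter replace_secuence_caracter replace_secuence_caracter_alt
  apply String.toList_inj.mp
  simp only [List.foldl, PySem.Str.toList_replace]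
  rw [show ("\\r" : String).toList = ['\\', 'r'] from rfl,
      show ("\r" : String).toList = ['\r'] from rfl,
      show ("\\n" : String).toList = ['\\', 'n'] from rfl,
      show ("\n" : String).toList = ['\n'] from rfl,
      show ("\\'" : String).toList = ['\\', '\''] from rfl,
      show ("'" : String).toList = ['\''] from rfl,
      show ("\\\"" : String).toList = ['\\', '"'] from rfl,
      show ("\"" : String).toList = ['"'] from rfl,
      show ("\\t" : String).toList = ['\\', 't'] from rfl,
      show ("\t" : String).toList = ['\t'] from rfl,
      show ("\\v" : String).toList = ['\\', 'v'] from rfl,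
      show ("\x0b" : String).toList = ['\x0b'] from rfl]
  rw [pvReplace_eq_scanK, pvReplace_eq_scanK, pvReplace_eq_scanK,
      pvReplace_eq_scanK, pvReplace_eq_scanK, pvReplace_eq_scanK]
  rw [pvScanK_comp [('r', '\r')] 'n' '\n' (by decide) (by simp) (by simp)]
  simp only [List.cons_append, List.nil_append]
  rw [pvScanK_comp [('r', '\r'), ('n', '\n')] '\'' '\'' (by decide) (by simp) (by simp)]
  simp only [List.cons_append, List.nil_append]
  rw [pvScanK_comp [('r', '\r'), ('n', '\n'), ('\'', '\'')] '"' '"' (by decide) (by simp) (by simp)]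
  simp only [List.cons_append, List.nil_append]
  rw [pvScanK_comp [('r', '\r'), ('n', '\n'), ('\'', '\''), ('"', '"')] 't' '\t' (by decide) (by simp) (by simp)]
  simp only [List.cons_append, List.nil_append]
  rw [pvScanK_comp [('r', '\r'), ('n', '\n'), ('\'', '\''), ('"', '"'), ('t', '\t')] 'v' '\x0b' (by decide) (by simp) (by simp)]
  simp only [List.cons_append, List.nil_append]
  rw [pvScanB_eq]
  simp [pvKS]
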